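-- pv_equiv track=rewrite | github.com/Serfeg/Anime-Girls-BPA18-02 | Задание 2/Ерина/Erina_L2.py | very_even
-- ===== SOURCE A (Python) =====
-- def very_even(n):
--   if len(str(n)) == 1:
--     if (int(n) % 2 == 0) or (int(n) == 0):
--       return True
--     else:
--       return False
--   else:
--     num = 0
--     n = str(n)
--     for x in n:
--       num = num + int(x)
--     return very_even(num)
-- ===== SOURCE B (Python) =====
-- def very_even(n):
--     while n >= 10:
--         s = 0
--         m = n
--         while m > 0:
--             s += m % 10
--             m //= 10
--         n = s
--     return n % 2 == 0
-- ===== Notes on version B (the rewrite author's own statement) =====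
-- stated objective: alternative
-- what changed: Replaces A's recursive string-conversion digit summing (str(n), int per character, recursion) with an iterative pure-arithmetic while loop that extracts digits with modulus and floor division by ten, no string conversion at all.
import Mathlib
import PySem

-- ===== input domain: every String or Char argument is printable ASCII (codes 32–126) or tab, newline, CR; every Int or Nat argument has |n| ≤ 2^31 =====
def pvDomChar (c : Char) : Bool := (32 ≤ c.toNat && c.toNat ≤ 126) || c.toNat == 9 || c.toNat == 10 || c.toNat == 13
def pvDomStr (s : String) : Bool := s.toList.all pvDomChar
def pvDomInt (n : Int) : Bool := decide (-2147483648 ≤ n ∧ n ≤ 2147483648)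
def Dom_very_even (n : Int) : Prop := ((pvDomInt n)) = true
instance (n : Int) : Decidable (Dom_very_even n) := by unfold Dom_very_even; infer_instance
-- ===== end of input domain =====

-- B replaces A's string-based recursive digit summing by an iterative arithmetic (%10, //10) loop; return-value equivalence on n ≥ 0 (A raises ValueError on negative n).

-- ===== PORT A =====
-- A recurses on the digit sum; the fuel n.natAbs + 1 is a totality guard only (on Pre_ each
-- recursive argument strictly decreases, so the fuel is never exhausted).
def very_even_go : Nat → Int → Bool
  | 0, _ => false
  | fuel+1, n =>
    if PySem.List.len (PySem.Int.toChars n) = 1 then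
      if PySem.Int.mod n 2 = 0 ∨ n = 0 then true else false
    else
      very_even_go fuel
        ((PySem.Int.toChars n).foldl (fun num x => num + (PySem.Int.ofChars? [x]).getD 0) 0)

def very_even (n : Int) : Bool := very_even_go (n.natAbs + 1) n

-- ===== PORT B =====
-- inner while loop of B (s += m % 10; m //= 10); the fuel is a totality guard only
def bDigitSum : Nat → Int → Int → Int
  | 0, s, _ => s
  | fuel+1, s, m =>
    if 0 < m then bDigitSum fuel (s + PySem.Int.mod m 10) (PySem.Int.floordiv m 10) else s

-- outer while loop of B (replace n by its digit sum until one digit remains); fuel is a totality guard only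
def very_even_loop : Nat → Int → Bool
  | 0, n => decide (PySem.Int.mod n 2 = 0)
  | fuel+1, n =>
    if 10 ≤ n then very_even_loop fuel (bDigitSum (n.toNat + 1) 0 n)
    else decide (PySem.Int.mod n 2 = 0)

def very_even_alt (n : Int) : Bool := very_even_loop (n.toNat + 1) n

-- ===== PRECONDITION & SPEC =====
-- Pre_ excludes negative n, on which A raises ValueError (int('-') on the sign character).
def Pre_very_even (n : Int) : Prop := 0 ≤ n
instance (n : Int) : Decidable (Pre_very_even n) := by unfold Pre_very_even; infer_instance
def pvWitness_very_even : Int := (38)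

def Spec_very_even (n : Int) (out : Bool) : Prop := out = very_even_alt n
instance (n : Int) (out : Bool) : Decidable (Spec_very_even n out) := by unfold Spec_very_even; infer_instance

-- ===== CLAIM (what is proved, stated in full; the proofs are below) =====
def Claim_equal_very_even : Prop := ∀ (n : Int), Dom_very_even n → Pre_very_even n → Spec_very_even n (very_even n)

-- ===== LEMMAS AND PROOFS =====

-- arithmetic digit sum of a natural number
def pvAsum (k : Nat) : Nat :=
  if k = 0 then 0 else k % 10 + pvAsum (k / 10)
decreasing_by exact Nat.div_lt_self (Nat.pos_of_ne_zero (by assumption)) (by norm_num)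

theorem bDigitSum_nat (k : Nat) : ∀ (f : Nat) (s : Int), k < f →
    bDigitSum f s (k : Int) = s + (pvAsum k : Int) := by
  induction k using Nat.strong_induction_on with
  | _ k ih =>
    intro f s hf
    match f with
    | f + 1 =>
      rw [bDigitSum, pvAsum]
      by_cases hk : k = 0
      · simp [hk]
      · rw [if_pos (by omega : (0:Int) < (k:Int)), if_neg hk]
        rw [PySem.Int.mod_eq_emod_of_pos (by norm_num : (0:Int) < 10),
            PySem.Int.floordiv_eq_ediv_of_pos (by norm_num : (0:Int) < 10)]
        rw [show (k:Int) % 10 = ((k % 10 : Nat) : Int) by omega,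
            show (k:Int) / 10 = ((k / 10 : Nat) : Int) by omega]
        rw [ih (k / 10) (Nat.div_lt_self (Nat.pos_of_ne_zero hk) (by norm_num)) f _ (by omega)]
        push_cast; ring

theorem pvAsum_lt (k : Nat) (h : 10 ≤ k) : pvAsum k < k := by
  induction k using Nat.strong_induction_on with
  | _ k ih =>
    rw [pvAsum, if_neg (by omega : k ≠ 0)]
    by_cases h2 : 10 ≤ k / 10
    · have := ih (k / 10) (Nat.div_lt_self (by omega) (by norm_num)) h2
      omega
    · rw [pvAsum, if_neg (by omega : k / 10 ≠ 0),
          show k / 10 / 10 = 0 by omega, pvAsum, if_pos rfl]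
      omega

-- the character list str(m) produces for a natural number, most significant digit first
def pvDch (m : Nat) : List Char :=
  if m < 10 then [Nat.digitChar m] else pvDch (m / 10) ++ [Nat.digitChar (m % 10)]
decreasing_by exact Nat.div_lt_self (by omega) (by norm_num)

theorem toDigitsCore_eq_pvDch (m : Nat) : ∀ (f : Nat) (ds : List Char), m < f →
    Nat.toDigitsCore 10 f m ds = pvDch m ++ ds := by
  induction m using Nat.strong_induction_on with
  | _ m ih =>
    intro f ds hf
    match f with
    | f + 1 =>
      rw [pvDch]
      simp only [Nat.toDigitsCore]
      by_cases h : m / 10 = 0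
      · rw [if_pos h, if_pos (by omega : m < 10)]
        have : m % 10 = m := Nat.mod_eq_of_lt (by omega)
        simp [this]
      · rw [if_neg h, if_neg (by omega : ¬ m < 10)]
        rw [ih (m / 10) (Nat.div_lt_self (by omega) (by norm_num)) f _ (by omega)]
        simp

theorem toChars_nat (m : Nat) : PySem.Int.toChars (m : Int) = pvDch m := by
  simp only [PySem.Int.toChars, Nat.toDigits]
  rw [if_neg (by omega : ¬ (m:Int) < 0)]
  have : ((m:Int)).toNat = m := by omega
  rw [this, toDigitsCore_eq_pvDch m (m+1) [] (by omega), List.append_nil]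

theorem digitChar_val (d : Nat) (h : d < 10) :
    (PySem.Int.ofChars? [Nat.digitChar d]).getD 0 = (d : Int) := by
  interval_cases d <;> decide

theorem foldl_pvDch (m : Nat) : ∀ s : Int,
    (pvDch m).foldl (fun num x => num + (PySem.Int.ofChars? [x]).getD 0) s = s + (pvAsum m : Int) := by
  induction m using Nat.strong_induction_on with
  | _ m ih =>
    intro s
    rw [pvDch]
    by_cases h : m < 10
    · rw [if_pos h]
      simp only [List.foldl_cons, List.foldl_nil, digitChar_val m h]
      rw [pvAsum]
      by_cases hm : m = 0
      · simp [hm]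
      · rw [if_neg hm, pvAsum, if_pos (by omega : m / 10 = 0)]
        have : m % 10 = m := Nat.mod_eq_of_lt h
        simp [this]
    · rw [if_neg h, List.foldl_append]
      rw [ih (m / 10) (Nat.div_lt_self (by omega) (by norm_num)) s]
      simp only [List.foldl_cons, List.foldl_nil, digitChar_val (m % 10) (Nat.mod_lt _ (by norm_num))]
      conv_rhs => rw [pvAsum, if_neg (by omega : ¬ m = 0)]
      push_cast; ring

theorem pvDch_length_pos (m : Nat) : 0 < (pvDch m).length := by
  rw [pvDch]
  by_cases h : m < 10 <;> simp [h]

theorem pvDch_length_one_iff (m : Nat) : (pvDch m).length = 1 ↔ m < 10 := by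
  rw [pvDch]
  by_cases h : m < 10
  · simp [h]
  · rw [if_neg h]
    have := pvDch_length_pos (m / 10)
    simp only [List.length_append, List.length_cons, List.length_nil]
    omega

theorem go_eq_loop (m : Nat) : ∀ fuel fuel' : Nat, m < fuel → m < fuel' →
    very_even_go fuel (m : Int) = very_even_loop fuel' (m : Int) := by
  induction m using Nat.strong_induction_on with
  | _ m ih =>
    intro fuel fuel' hf hf'
    match fuel, fuel' with
    | fuel + 1, fuel' + 1 =>
      rw [very_even_go, very_even_loop, toChars_nat]
      simp only [PySem.List.len_eq]
      by_cases h : m < 10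
      · rw [if_pos (by exact_mod_cast (pvDch_length_one_iff m).mpr h)]
        rw [if_neg (by omega : ¬ (10:Int) ≤ (m:Int))]
        rw [PySem.Int.mod_eq_emod_of_pos (by norm_num : (0:Int) < 2)]
        by_cases he : ((m:Int)) % 2 = 0
        · simp [he]
        · rw [if_neg (by omega : ¬ ((m:Int) % 2 = 0 ∨ (m:Int) = 0))]
          simp [he]
      · rw [if_neg (by
          intro hc
          exact h ((pvDch_length_one_iff m).mp (by exact_mod_cast hc)))]
        rw [if_pos (by omega : (10:Int) ≤ (m:Int))]
        rw [foldl_pvDch m 0, Int.toNat_natCast,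
            bDigitSum_nat m (m + 1) 0 (by omega), zero_add]
        have hlt := pvAsum_lt m (by omega)
        exact ih (pvAsum m) hlt fuel fuel' (by omega) (by omega)

-- ===== VERDICT (by name: the statement is the Claim_ definition above) =====
theorem very_even_spec : Claim_equal_very_even := by
  intro n _ hpre
  unfold Spec_very_even very_even very_even_alt
  have hk : n = ((n.toNat : Nat) : Int) := by
    unfold Pre_very_even at hpre; omega
  rw [hk]
  rw [show (((n.toNat : Nat) : Int)).natAbs = n.toNat by omega, Int.toNat_natCast]
  exact go_eq_loop n.toNat (n.toNat + 1) (n.toNat + 1) (by omega) (by omega)
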